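-- pv_equiv track=rewrite | github.com/furkntrg41/S-navTakvim | src/core/seating_manager.py | _assign_by_seating_arrangement
-- ===== SOURCE A (Python) =====
-- def _assign_by_seating_arrangement(
--
--     exam_session_id: int,
--     students: list,
--     rows: int,
--     cols: int,
--     seating_arrangement: int
-- ) -> list:
--     assignments = []
--     student_idx = 0
--
--     if seating_arrangement == 2:
--         for row in range(1, rows + 1):
--             for col in range(2, cols + 1, 2):
--                 if student_idx >= len(students):
--                     return assignments
--
--                 assignments.append({
--                     'exam_session_id': exam_session_id,
--                     'student_id': students[student_idx]['id'],
--                     'row_number': row,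
--                     'column_number': col,
--                     'seat_number': (row - 1) * cols + col
--                 })
--                 student_idx += 1
--
--     elif seating_arrangement == 3:
--         for row in range(1, rows + 1):
--             for col in range(1, cols + 1):
--                 col_in_group = ((col - 1) % 3) + 1
--                 if col_in_group == 1 or col_in_group == 3:
--                     if student_idx >= len(students):
--                         return assignments
--
--                     assignments.append({
--                         'exam_session_id': exam_session_id,
--                         'student_id': students[student_idx]['id'],
--                         'row_number': row,
--                         'column_number': col,
--                         'seat_number': (row - 1) * cols + col
--                     })
--                     student_idx += 1
--
--     elif seating_arrangement == 4:
--         for row in range(1, rows + 1):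
--             for col in range(1, cols + 1):
--                 col_in_group = ((col - 1) % 4) + 1
--                 if col_in_group == 1 or col_in_group == 4:
--                     if student_idx >= len(students):
--                         return assignments
--
--                     assignments.append({
--                         'exam_session_id': exam_session_id,
--                         'student_id': students[student_idx]['id'],
--                         'row_number': row,
--                         'column_number': col,
--                         'seat_number': (row - 1) * cols + col
--                     })
--                     student_idx += 1
--
--     else:
--         for row in range(1, rows + 1):
--             if row % 2 == 1:
--                 start_col = 1
--             else:
--                 start_col = 2
--
--             for col in range(start_col, cols + 1, 2):
--                 if student_idx >= len(students):
--                     return assignments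
--
--                 assignments.append({
--                     'exam_session_id': exam_session_id,
--                     'student_id': students[student_idx]['id'],
--                     'row_number': row,
--                     'column_number': col,
--                     'seat_number': (row - 1) * cols + col
--                 })
--                 student_idx += 1
--
--     return assignments
-- ===== SOURCE B (Python) =====
-- def _assign_by_seating_arrangement(
--     exam_session_id: int,
--     students: list,
--     rows: int,
--     cols: int,
--     seating_arrangement: int
-- ) -> list:
--     # Closed-form: map each student index k directly to its (row, col) by arithmetic;
--     # no enumeration of the grid, O(number of seated students) work.
--     R = rows if rows > 0 else 0
--
--     if seating_arrangement == 2: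
--         p = cols // 2 if cols > 0 else 0
--         capacity = R * p
--         def seat(k):
--             return (k // p + 1, 2 * (k % p) + 2)
--     elif seating_arrangement == 3:
--         p = 2 * (cols // 3) + (1 if cols % 3 >= 1 else 0) if cols > 0 else 0
--         capacity = R * p
--         def seat(k):
--             j = k % p
--             return (k // p + 1, 3 * (j // 2) + 1 + 2 * (j % 2))
--     elif seating_arrangement == 4:
--         p = 2 * (cols // 4) + (1 if cols % 4 >= 1 else 0) if cols > 0 else 0
--         capacity = R * p
--         def seat(k):
--             j = k % p
--             return (k // p + 1, 4 * (j // 2) + 1 + 3 * (j % 2))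
--     else:
--         p_odd = (cols + 1) // 2 if cols > 0 else 0
--         p_even = cols // 2 if cols > 0 else 0
--         P = p_odd + p_even
--         capacity = ((R + 1) // 2) * p_odd + (R // 2) * p_even
--         def seat(k):
--             if k % P < p_odd:
--                 return (2 * (k // P) + 1, 2 * (k % P) + 1)
--             return (2 * (k // P) + 2, 2 * (k % P - p_odd) + 2)
--
--     n = min(len(students), capacity)
--     out = []
--     for k in range(n):
--         row, col = seat(k)
--         out.append({
--             'exam_session_id': exam_session_id,
--             'student_id': students[k]['id'],
--             'row_number': row,
--             'column_number': col,
--             'seat_number': (row - 1) * cols + col,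
--         })
--     return out
-- ===== Notes on version B (the rewrite author's own statement) =====
-- stated objective: alternative
-- what changed: Replaces A's nested row/column grid loops with early return by closed-form index arithmetic: each student index k is mapped directly to its (row,col) via division/modulo on the per-row seat count, and the output is built in one pass over min(len(students), capacity) indices without enumerating the grid.
import Mathlib
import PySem

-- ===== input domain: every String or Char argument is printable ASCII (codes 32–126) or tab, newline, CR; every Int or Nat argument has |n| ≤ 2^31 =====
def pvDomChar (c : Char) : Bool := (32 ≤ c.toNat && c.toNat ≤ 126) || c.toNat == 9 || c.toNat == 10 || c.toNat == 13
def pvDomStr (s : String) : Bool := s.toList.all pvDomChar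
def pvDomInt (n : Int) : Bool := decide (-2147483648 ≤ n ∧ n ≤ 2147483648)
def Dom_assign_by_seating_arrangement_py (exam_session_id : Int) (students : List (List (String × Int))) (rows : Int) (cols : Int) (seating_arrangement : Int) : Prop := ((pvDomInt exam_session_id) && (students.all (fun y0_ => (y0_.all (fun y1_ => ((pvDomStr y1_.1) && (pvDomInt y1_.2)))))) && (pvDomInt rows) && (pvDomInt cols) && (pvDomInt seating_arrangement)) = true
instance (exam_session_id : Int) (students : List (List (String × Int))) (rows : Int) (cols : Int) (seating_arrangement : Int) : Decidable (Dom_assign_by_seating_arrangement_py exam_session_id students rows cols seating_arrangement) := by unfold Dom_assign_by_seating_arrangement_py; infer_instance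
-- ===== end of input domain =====

-- B replaces A's nested grid loops (early return on student exhaustion) by closed-form index
-- arithmetic: student index k is mapped directly to its (row, col) by division/modulo on the
-- per-row seat count; only min(len(students), capacity) seats are ever computed.


-- ===== PORT A =====
-- shared helper: the dict literal both Pythons build for one seat; students[idx]['id'] is
-- first-match association-list lookup ('id' present by Pre_, so the `.getD 0` default is never used)
def pvSeatDict (eid : Int) (stu : List (String × Int)) (row col cols : Int) : List (String × Int) :=
  [("exam_session_id", eid),
   ("student_id", (List.lookup "id" stu).getD 0),
   ("row_number", row),
   ("column_number", col),
   ("seat_number", (row - 1) * cols + col)]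

-- inner column loop of branches 2 and the default branch (no column filter);
-- third component = True means the early `return assignments` fired
def pvAInnerPlain (eid : Int) (students : List (List (String × Int))) (cols row : Int) :
    List Int → Nat → List (List (String × Int)) → (List (List (String × Int)) × Nat × Bool)
  | [], idx, acc => (acc, idx, false)
  | col :: rest, idx, acc =>
    if students.length ≤ idx then (acc, idx, true)
    else pvAInnerPlain eid students cols row rest (idx + 1)
      (acc ++ [pvSeatDict eid (students.getD idx []) row col cols])

-- inner column loop of branch 3 (col_in_group test for groups of 3)
def pvAInner3 (eid : Int) (students : List (List (String × Int))) (cols row : Int) :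
    List Int → Nat → List (List (String × Int)) → (List (List (String × Int)) × Nat × Bool)
  | [], idx, acc => (acc, idx, false)
  | col :: rest, idx, acc =>
    let cig := PySem.Int.mod (col - 1) 3 + 1
    if cig = 1 ∨ cig = 3 then
      if students.length ≤ idx then (acc, idx, true)
      else pvAInner3 eid students cols row rest (idx + 1)
        (acc ++ [pvSeatDict eid (students.getD idx []) row col cols])
    else pvAInner3 eid students cols row rest idx acc

-- inner column loop of branch 4 (col_in_group test for groups of 4)
def pvAInner4 (eid : Int) (students : List (List (String × Int))) (cols row : Int) :
    List Int → Nat → List (List (String × Int)) → (List (List (String × Int)) × Nat × Bool)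
  | [], idx, acc => (acc, idx, false)
  | col :: rest, idx, acc =>
    let cig := PySem.Int.mod (col - 1) 4 + 1
    if cig = 1 ∨ cig = 4 then
      if students.length ≤ idx then (acc, idx, true)
      else pvAInner4 eid students cols row rest (idx + 1)
        (acc ++ [pvSeatDict eid (students.getD idx []) row col cols])
    else pvAInner4 eid students cols row rest idx acc

-- outer row loop (identical in all four branches; each branch passes its own inner loop)
def pvAOuter (inner : Int → Nat → List (List (String × Int)) → (List (List (String × Int)) × Nat × Bool)) :
    List Int → Nat → List (List (String × Int)) → List (List (String × Int))
  | [], _, acc => acc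
  | row :: rest, idx, acc =>
    let r := inner row idx acc
    if r.2.2 then r.1 else pvAOuter inner rest r.2.1 r.1

def assign_by_seating_arrangement_py (exam_session_id : Int) (students : List (List (String × Int))) (rows : Int) (cols : Int) (seating_arrangement : Int) : List (List (String × Int)) :=
  if seating_arrangement = 2 then
    pvAOuter (fun row idx acc =>
        pvAInnerPlain exam_session_id students cols row (PySem.List.pyRange 2 (cols + 1) 2) idx acc)
      (PySem.List.pyRange 1 (rows + 1) 1) 0 []
  else if seating_arrangement = 3 then
    pvAOuter (fun row idx acc =>
        pvAInner3 exam_session_id students cols row (PySem.List.pyRange 1 (cols + 1) 1) idx acc)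
      (PySem.List.pyRange 1 (rows + 1) 1) 0 []
  else if seating_arrangement = 4 then
    pvAOuter (fun row idx acc =>
        pvAInner4 exam_session_id students cols row (PySem.List.pyRange 1 (cols + 1) 1) idx acc)
      (PySem.List.pyRange 1 (rows + 1) 1) 0 []
  else
    pvAOuter (fun row idx acc =>
        pvAInnerPlain exam_session_id students cols row
          (PySem.List.pyRange (if PySem.Int.mod row 2 = 1 then 1 else 2) (cols + 1) 2) idx acc)
      (PySem.List.pyRange 1 (rows + 1) 1) 0 []

-- ===== PORT B =====
-- Source B's seat(k) closures, one per arrangement (p / pOdd, P are the per-row / per-row-pair counts)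
def pvSeatB2 (p k : Int) : Int × Int :=
  (PySem.Int.floordiv k p + 1, 2 * PySem.Int.mod k p + 2)

-- the j-th valid column of a row under arrangement 3 (j = k % p)
def pvColFn3 (j : Int) : Int := 3 * PySem.Int.floordiv j 2 + 1 + 2 * PySem.Int.mod j 2

def pvSeatB3 (p k : Int) : Int × Int :=
  (PySem.Int.floordiv k p + 1, pvColFn3 (PySem.Int.mod k p))

-- the j-th valid column of a row under arrangement 4
def pvColFn4 (j : Int) : Int := 4 * PySem.Int.floordiv j 2 + 1 + 3 * PySem.Int.mod j 2

def pvSeatB4 (p k : Int) : Int × Int :=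
  (PySem.Int.floordiv k p + 1, pvColFn4 (PySem.Int.mod k p))

-- default arrangement: k splits into the row pair k // P and the offset w = k % P inside it
def pvSeatBD (pOdd P k : Int) : Int × Int :=
  if PySem.Int.mod k P < pOdd then
    (2 * PySem.Int.floordiv k P + 1, 2 * PySem.Int.mod k P + 1)
  else
    (2 * PySem.Int.floordiv k P + 2, 2 * (PySem.Int.mod k P - pOdd) + 2)

-- Source B's final loop: one dict per index k < min(len(students), capacity)
def pvBuildB (eid : Int) (students : List (List (String × Int))) (cols cap : Int)
    (seat : Int → Int × Int) : List (List (String × Int)) :=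
  (List.range (min (students.length : Int) cap).toNat).map (fun k =>
    pvSeatDict eid (students.getD k []) (seat (k : Int)).1 (seat (k : Int)).2 cols)

def assign_by_seating_arrangement_py_alt (exam_session_id : Int) (students : List (List (String × Int))) (rows : Int) (cols : Int) (seating_arrangement : Int) : List (List (String × Int)) :=
  -- Source B's locals R / p / p_odd / p_even are inlined below (each is written out where used)
  if seating_arrangement = 2 then
    pvBuildB exam_session_id students cols
      ((if 0 < rows then rows else 0) * (if 0 < cols then PySem.Int.floordiv cols 2 else 0))
      (pvSeatB2 (if 0 < cols then PySem.Int.floordiv cols 2 else 0))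
  else if seating_arrangement = 3 then
    pvBuildB exam_session_id students cols
      ((if 0 < rows then rows else 0) *
        (if 0 < cols then
          2 * PySem.Int.floordiv cols 3 + (if 1 ≤ PySem.Int.mod cols 3 then 1 else 0) else 0))
      (pvSeatB3 (if 0 < cols then
          2 * PySem.Int.floordiv cols 3 + (if 1 ≤ PySem.Int.mod cols 3 then 1 else 0) else 0))
  else if seating_arrangement = 4 then
    pvBuildB exam_session_id students cols
      ((if 0 < rows then rows else 0) *
        (if 0 < cols then
          2 * PySem.Int.floordiv cols 4 + (if 1 ≤ PySem.Int.mod cols 4 then 1 else 0) else 0))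
      (pvSeatB4 (if 0 < cols then
          2 * PySem.Int.floordiv cols 4 + (if 1 ≤ PySem.Int.mod cols 4 then 1 else 0) else 0))
  else
    pvBuildB exam_session_id students cols
      (PySem.Int.floordiv ((if 0 < rows then rows else 0) + 1) 2 *
          (if 0 < cols then PySem.Int.floordiv (cols + 1) 2 else 0)
        + PySem.Int.floordiv (if 0 < rows then rows else 0) 2 *
          (if 0 < cols then PySem.Int.floordiv cols 2 else 0))
      (pvSeatBD (if 0 < cols then PySem.Int.floordiv (cols + 1) 2 else 0)
        ((if 0 < cols then PySem.Int.floordiv (cols + 1) 2 else 0) +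
         (if 0 < cols then PySem.Int.floordiv cols 2 else 0)))

-- ===== PRECONDITION & SPEC =====
-- number of valid seats in one row for grouped arrangements (2 aisle-separated seats per group of g)
def pvPerRowGrouped (cols g : Int) : Int :=
  if cols ≤ 0 then 0
  else 2 * PySem.Int.floordiv cols g + (if 1 ≤ PySem.Int.mod cols g then 1 else 0)

-- closed-form number of seats the grid offers under the given arrangement
def pvSeatCount (rows cols seating_arrangement : Int) : Int :=
  let R := max rows 0
  if seating_arrangement = 2 then R * max (PySem.Int.floordiv cols 2) 0
  else if seating_arrangement = 3 then R * pvPerRowGrouped cols 3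
  else if seating_arrangement = 4 then R * pvPerRowGrouped cols 4
  else PySem.Int.floordiv (R + 1) 2 * max (PySem.Int.floordiv (cols + 1) 2) 0
       + PySem.Int.floordiv R 2 * max (PySem.Int.floordiv cols 2) 0

-- Pre_ excludes exactly the inputs on which Python A raises KeyError: some student that actually
-- gets seated (index below both len(students) and the grid's seat count) lacks an 'id' key.
def Pre_assign_by_seating_arrangement_py (exam_session_id : Int) (students : List (List (String × Int))) (rows : Int) (cols : Int) (seating_arrangement : Int) : Prop :=
  ∀ k : Nat, k < students.length → (k : Int) < pvSeatCount rows cols seating_arrangement →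
    (List.lookup "id" (students.getD k [])).isSome = true
instance (exam_session_id : Int) (students : List (List (String × Int))) (rows : Int) (cols : Int) (seating_arrangement : Int) : Decidable (Pre_assign_by_seating_arrangement_py exam_session_id students rows cols seating_arrangement) := by unfold Pre_assign_by_seating_arrangement_py; infer_instance

def pvWitness_assign_by_seating_arrangement_py : Int × (List (List (String × Int))) × Int × Int × Int :=
  (7, [[("id", 5)], [("id", 6)]], 2, 3, 1)

def Spec_assign_by_seating_arrangement_py (exam_session_id : Int) (students : List (List (String × Int))) (rows : Int) (cols : Int) (seating_arrangement : Int) (out : List (List (String × Int))) : Prop := out = assign_by_seating_arrangement_py_alt exam_session_id students rows cols seating_arrangement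
instance (exam_session_id : Int) (students : List (List (String × Int))) (rows : Int) (cols : Int) (seating_arrangement : Int) (out : List (List (String × Int))) : Decidable (Spec_assign_by_seating_arrangement_py exam_session_id students rows cols seating_arrangement out) := by unfold Spec_assign_by_seating_arrangement_py; infer_instance

-- ===== CLAIM (what is proved, stated in full; the proofs are below) =====
def Claim_equal_assign_by_seating_arrangement_py : Prop := ∀ (exam_session_id : Int) (students : List (List (String × Int))) (rows : Int) (cols : Int) (seating_arrangement : Int), Dom_assign_by_seating_arrangement_py exam_session_id students rows cols seating_arrangement → Pre_assign_by_seating_arrangement_py exam_session_id students rows cols seating_arrangement → Spec_assign_by_seating_arrangement_py exam_session_id students rows cols seating_arrangement (assign_by_seating_arrangement_py exam_session_id students rows cols seating_arrangement)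

-- ===== LEMMAS AND PROOFS =====

-- Nat versions of Source B's per-row counts and capacities, used to index List.range in the proofs
def pvPN2 (cols : Int) : Nat := cols.toNat / 2
def pvPN3 (cols : Int) : Nat := 2 * (cols.toNat / 3) + (if 1 ≤ cols.toNat % 3 then 1 else 0)
def pvPN4 (cols : Int) : Nat := 2 * (cols.toNat / 4) + (if 1 ≤ cols.toNat % 4 then 1 else 0)
def pvPOddN (cols : Int) : Nat := (cols.toNat + 1) / 2
def pvPEvenN (cols : Int) : Nat := cols.toNat / 2

-- proof-side runner: process a flat list of (row, col) seats, stopping when students run out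
def pvRun (eid : Int) (students : List (List (String × Int))) (cols : Int) :
    List (Int × Int) → Nat → List (List (String × Int)) → (List (List (String × Int)) × Nat)
  | [], idx, acc => (acc, idx)
  | (r, c) :: rest, idx, acc =>
    if students.length ≤ idx then (acc, idx)
    else pvRun eid students cols rest (idx + 1)
      (acc ++ [pvSeatDict eid (students.getD idx []) r c cols])

theorem pvRun_stop (eid : Int) (students : List (List (String × Int))) (cols : Int)
    (seats : List (Int × Int)) (idx : Nat) (acc : List (List (String × Int)))
    (h : students.length ≤ idx) : pvRun eid students cols seats idx acc = (acc, idx) := by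
  cases seats with
  | nil => rfl
  | cons p rest => obtain ⟨r, c⟩ := p; simp [pvRun, h]

theorem pvRun_append (eid : Int) (students : List (List (String × Int))) (cols : Int)
    (s1 s2 : List (Int × Int)) (idx : Nat) (acc : List (List (String × Int))) :
    pvRun eid students cols (s1 ++ s2) idx acc
      = pvRun eid students cols s2 (pvRun eid students cols s1 idx acc).2
          (pvRun eid students cols s1 idx acc).1 := by
  induction s1 generalizing idx acc with
  | nil => rfl
  | cons p rest ih =>
    obtain ⟨r, c⟩ := p
    by_cases h : students.length ≤ idx
    · simp [pvRun, h, pvRun_stop eid students cols s2 idx acc h]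
    · simp [pvRun, h, ih]

-- an inner-loop result agrees with pvRun on that row's seats, and a raised stop flag
-- means the students are exhausted
def pvInnerSpec (eid : Int) (students : List (List (String × Int))) (cols : Int)
    (inner : Int → Nat → List (List (String × Int)) → (List (List (String × Int)) × Nat × Bool))
    (seatsOf : Int → List (Int × Int)) : Prop :=
  ∀ row idx acc,
    (inner row idx acc).1 = (pvRun eid students cols (seatsOf row) idx acc).1 ∧
    (inner row idx acc).2.1 = (pvRun eid students cols (seatsOf row) idx acc).2 ∧
    ((inner row idx acc).2.2 = true → students.length ≤ (pvRun eid students cols (seatsOf row) idx acc).2)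

theorem pvInnerPlain_spec (eid : Int) (students : List (List (String × Int))) (cols : Int)
    (colsOf : Int → List Int) :
    pvInnerSpec eid students cols
      (fun row idx acc => pvAInnerPlain eid students cols row (colsOf row) idx acc)
      (fun row => (colsOf row).map (fun c => (row, c))) := by
  unfold pvInnerSpec
  intro row idx acc
  simp only []
  generalize colsOf row = cl
  induction cl generalizing idx acc with
  | nil => simp [pvAInnerPlain, pvRun]
  | cons col rest ih =>
    simp only [pvAInnerPlain, List.map_cons, pvRun]
    by_cases h : students.length ≤ idx
    · simp only [if_pos h]; exact ⟨trivial, trivial, fun _ => h⟩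
    · simp only [if_neg h]; exact ih (idx + 1) _

theorem pvCig3_iff (m : Int) : (m + 1 = 1 ∨ m + 1 = 3) ↔ ((m == 0 || m == 2) = true) := by
  simp only [Bool.or_eq_true, beq_iff_eq]; omega

theorem pvCig4_iff (m : Int) : (m + 1 = 1 ∨ m + 1 = 4) ↔ ((m == 0 || m == 3) = true) := by
  simp only [Bool.or_eq_true, beq_iff_eq]; omega

theorem pvInner3_spec (eid : Int) (students : List (List (String × Int))) (cols : Int)
    (colsOf : Int → List Int) :
    pvInnerSpec eid students cols
      (fun row idx acc => pvAInner3 eid students cols row (colsOf row) idx acc)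
      (fun row => ((colsOf row).filter
        (fun c => PySem.Int.mod (c - 1) 3 == 0 || PySem.Int.mod (c - 1) 3 == 2)).map
          (fun c => (row, c))) := by
  unfold pvInnerSpec
  intro row idx acc
  simp only []
  generalize colsOf row = cl
  induction cl generalizing idx acc with
  | nil => simp [pvAInner3, pvRun]
  | cons col rest ih =>
    simp only [pvAInner3, List.filter_cons]
    by_cases hg : PySem.Int.mod (col - 1) 3 + 1 = 1 ∨ PySem.Int.mod (col - 1) 3 + 1 = 3
    · have hb := (pvCig3_iff (PySem.Int.mod (col - 1) 3)).mp hg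
      rw [if_pos hg, if_pos hb, List.map_cons]
      simp only [pvRun]
      by_cases h : students.length ≤ idx
      · simp only [if_pos h]; exact ⟨trivial, trivial, fun _ => h⟩
      · simp only [if_neg h]; exact ih (idx + 1) _
    · have hb : ¬ ((PySem.Int.mod (col - 1) 3 == 0 || PySem.Int.mod (col - 1) 3 == 2) = true) := by
        exact fun hc => hg ((pvCig3_iff _).mpr hc)
      rw [if_neg hg, if_neg hb]
      exact ih idx acc

theorem pvInner4_spec (eid : Int) (students : List (List (String × Int))) (cols : Int)
    (colsOf : Int → List Int) :
    pvInnerSpec eid students cols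
      (fun row idx acc => pvAInner4 eid students cols row (colsOf row) idx acc)
      (fun row => ((colsOf row).filter
        (fun c => PySem.Int.mod (c - 1) 4 == 0 || PySem.Int.mod (c - 1) 4 == 3)).map
          (fun c => (row, c))) := by
  unfold pvInnerSpec
  intro row idx acc
  simp only []
  generalize colsOf row = cl
  induction cl generalizing idx acc with
  | nil => simp [pvAInner4, pvRun]
  | cons col rest ih =>
    simp only [pvAInner4, List.filter_cons]
    by_cases hg : PySem.Int.mod (col - 1) 4 + 1 = 1 ∨ PySem.Int.mod (col - 1) 4 + 1 = 4
    · have hb := (pvCig4_iff (PySem.Int.mod (col - 1) 4)).mp hg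
      rw [if_pos hg, if_pos hb, List.map_cons]
      simp only [pvRun]
      by_cases h : students.length ≤ idx
      · simp only [if_pos h]; exact ⟨trivial, trivial, fun _ => h⟩
      · simp only [if_neg h]; exact ih (idx + 1) _
    · have hb : ¬ ((PySem.Int.mod (col - 1) 4 == 0 || PySem.Int.mod (col - 1) 4 == 3) = true) := by
        exact fun hc => hg ((pvCig4_iff _).mpr hc)
      rw [if_neg hg, if_neg hb]
      exact ih idx acc

theorem pvAOuter_eq (eid : Int) (students : List (List (String × Int))) (cols : Int)
    (inner : Int → Nat → List (List (String × Int)) → (List (List (String × Int)) × Nat × Bool))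
    (seatsOf : Int → List (Int × Int))
    (hspec : pvInnerSpec eid students cols inner seatsOf)
    (rowList : List Int) (idx : Nat) (acc : List (List (String × Int))) :
    pvAOuter inner rowList idx acc
      = (pvRun eid students cols (rowList.flatMap seatsOf) idx acc).1 := by
  induction rowList generalizing idx acc with
  | nil => simp [pvAOuter, pvRun]
  | cons row rest ih =>
    obtain ⟨h1, h2, h3⟩ := hspec row idx acc
    rw [List.flatMap_cons, pvRun_append]
    by_cases hs : (inner row idx acc).2.2 = true
    · rw [pvRun_stop eid students cols _ _ _ (h3 hs)]
      simp [pvAOuter, hs, h1]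
    · simp only [pvAOuter]
      rw [if_neg hs, ih, h1, h2]

theorem pvRun_eq_zip (eid : Int) (students : List (List (String × Int))) (cols : Int)
    (seats : List (Int × Int)) (idx : Nat) (acc : List (List (String × Int))) :
    (pvRun eid students cols seats idx acc).1
      = acc ++ List.zipWith (fun s (p : Int × Int) => pvSeatDict eid s p.1 p.2 cols)
          (students.drop idx) seats := by
  induction seats generalizing idx acc with
  | nil => simp [pvRun]
  | cons p rest ih =>
    obtain ⟨r, c⟩ := p
    by_cases h : students.length ≤ idx
    · simp [pvRun, h, List.drop_eq_nil_of_le h]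
    · rw [Nat.not_le] at h
      rw [List.drop_eq_getElem_cons h]
      simp only [pvRun, not_le.mpr h, if_false, List.zipWith_cons_cons]
      rw [ih (idx + 1), List.getD_eq_getElem students [] h]
      simp

-- zipping the students with a range-indexed position list is a map over the truncated range
theorem pvZip_eq (eid cols : Int) (students : List (List (String × Int))) (capN : Nat)
    (g : Nat → Int × Int) :
    List.zipWith (fun s (p : Int × Int) => pvSeatDict eid s p.1 p.2 cols) students
        ((List.range capN).map g)
      = (List.range (min students.length capN)).map
          (fun k => pvSeatDict eid (students.getD k []) (g k).1 (g k).2 cols) := by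
  apply List.ext_getElem
  · simp
  · intro k h1 h2
    simp only [List.length_zipWith, List.length_map, List.length_range] at h1
    have hk : k < students.length := lt_of_lt_of_le h1 (min_le_left _ _)
    simp only [List.getElem_zipWith, List.getElem_map, List.getElem_range]
    rw [List.getD_eq_getElem students [] hk]

-- the zipWith-of-positions form equals Source B's build loop (cap a Nat cast)
theorem pvBuild_eq (eid : Int) (students : List (List (String × Int))) (cols : Int)
    (capN : Nat) (seat : Int → Int × Int) :
    List.zipWith (fun s (p : Int × Int) => pvSeatDict eid s p.1 p.2 cols) students
        ((List.range capN).map (fun k : Nat => seat (k : Int)))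
      = pvBuildB eid students cols (capN : Int) seat := by
  unfold pvBuildB
  have hn : (min (students.length : Int) (capN : Int)).toNat = min students.length capN := by
    omega
  rw [hn, pvZip_eq]

-- division/modulo of a block offset: (i*p + j) // p = i, (i*p + j) % p = j for 0 ≤ j < p
theorem pv_div_block (p i j : Int) (h0 : 0 ≤ j) (hj : j < p) :
    PySem.Int.floordiv (i * p + j) p = i ∧ PySem.Int.mod (i * p + j) p = j := by
  have hp : 0 < p := lt_of_le_of_lt h0 hj
  have he : i * p + j = j + p * i := by ring
  rw [PySem.Int.floordiv_eq_ediv_of_pos hp, PySem.Int.mod_eq_emod_of_pos hp, he]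
  constructor
  · rw [Int.add_mul_ediv_left _ _ (ne_of_gt hp), Int.ediv_eq_zero_of_lt h0 hj]; ring
  · have h2 : (j + p * i) % p = j % p := Int.add_mul_emod_self_left j p i
    rw [h2, Int.emod_eq_of_lt h0 hj]

-- rows contribute fixed-size blocks, so the flattened grid is one range of seat indices
theorem pv_flatMap_blocks {α : Type} (rowsN pN : Nat) (rowSeats : Nat → List α) (g : Nat → α)
    (h : ∀ i, i < rowsN → rowSeats i = (List.range pN).map (fun j => g (i * pN + j))) :
    (List.range rowsN).flatMap rowSeats = (List.range (rowsN * pN)).map g := by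
  induction rowsN with
  | zero => simp
  | succ R ih =>
    rw [List.range_succ, List.flatMap_append,
        ih (fun i hi => h i (Nat.lt_succ_of_lt hi))]
    simp only [List.flatMap_cons, List.flatMap_nil, List.append_nil]
    rw [h R (Nat.lt_succ_self R)]
    have : (R + 1) * pN = R * pN + pN := by ring
    rw [this, List.range_add, List.map_append, List.map_map]
    simp [Function.comp]

-- two strictly increasing integer lists with the same members are equal
theorem pv_sorted_ext (l1 l2 : List Int) (h1 : l1.Pairwise (· < ·)) (h2 : l2.Pairwise (· < ·))
    (hm : ∀ x, x ∈ l1 ↔ x ∈ l2) : l1 = l2 := by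
  have n1 : l1.Nodup := h1.imp (fun h => ne_of_lt h)
  have n2 : l2.Nodup := h2.imp (fun h => ne_of_lt h)
  exact List.Perm.eq_of_pairwise
    (fun a b _ _ hab hba => absurd hba (not_lt.mpr (le_of_lt hab))) h1 h2
    ((List.perm_ext_iff_of_nodup n1 n2).mpr hm)

-- a step-2 pyRange of columns, paired with its row, as a map over one List.range
theorem pv_row_step2 (row s cols : Int) (cnt : Nat)
    (hcnt : (if s < cols + 1 then ((cols + 1 - s + 2 - 1) / 2).toNat else 0) = cnt) :
    (PySem.List.pyRange s (cols + 1) 2).map (fun c => (row, c))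
      = (List.range cnt).map (fun j : Nat => (row, s + 2 * (j : Int))) := by
  rw [PySem.List.pyRange_of_pos s (cols + 1) (by norm_num : (0:Int) < 2), hcnt, List.map_map]
  rfl

theorem pv_cnt2 (cols : Int) :
    (if (2:Int) < cols + 1 then ((cols + 1 - 2 + 2 - 1) / 2).toNat else 0) = pvPN2 cols := by
  unfold pvPN2; split_ifs <;> omega

theorem pv_cnt1 (cols : Int) :
    (if (1:Int) < cols + 1 then ((cols + 1 - 1 + 2 - 1) / 2).toNat else 0) = pvPOddN cols := by
  unfold pvPOddN; split_ifs <;> omega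

-- the row list range(1, rows+1) as a map over List.range
theorem pv_rowlist (rows : Int) :
    PySem.List.pyRange 1 (rows + 1) 1
      = (List.range rows.toNat).map (fun k : Nat => 1 + (k : Int)) := by
  rw [PySem.List.pyRange_one]
  have h : rows + 1 - 1 = rows := by ring
  rw [h]

-- strict monotonicity of the closed-form column maps
theorem pvColFn3_lt (a b : Int) (h : a < b) : pvColFn3 a < pvColFn3 b := by
  unfold pvColFn3
  simp only [PySem.Int.floordiv_eq_ediv_of_pos (show (0:Int) < 2 by norm_num),
             PySem.Int.mod_eq_emod_of_pos (show (0:Int) < 2 by norm_num)]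
  omega

theorem pvColFn4_lt (a b : Int) (h : a < b) : pvColFn4 a < pvColFn4 b := by
  unfold pvColFn4
  simp only [PySem.Int.floordiv_eq_ediv_of_pos (show (0:Int) < 2 by norm_num),
             PySem.Int.mod_eq_emod_of_pos (show (0:Int) < 2 by norm_num)]
  omega

-- x is a valid arrangement-3 column iff it is pvColFn3 of an index below the per-row count
theorem pv_mem3 (cols x : Int) :
    (1 ≤ x ∧ x < cols + 1 ∧ ((x - 1) % 3 = 0 ∨ (x - 1) % 3 = 2))
      ↔ ∃ j : Nat, j < pvPN3 cols ∧ pvColFn3 (j : Int) = x := by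
  constructor
  · rintro ⟨h1, hc, h3⟩
    refine ⟨(2 * ((x - 1) / 3) + ((x - 1) % 3) / 2).toNat, ?_, ?_⟩
    · unfold pvPN3; split_ifs <;> omega
    · unfold pvColFn3
      simp only [PySem.Int.floordiv_eq_ediv_of_pos (show (0:Int) < 2 by norm_num),
                 PySem.Int.mod_eq_emod_of_pos (show (0:Int) < 2 by norm_num)]
      omega
  · rintro ⟨j, hj, he⟩
    unfold pvColFn3 at he
    simp only [PySem.Int.floordiv_eq_ediv_of_pos (show (0:Int) < 2 by norm_num),
               PySem.Int.mod_eq_emod_of_pos (show (0:Int) < 2 by norm_num)] at he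
    unfold pvPN3 at hj
    obtain ⟨q, rfl | rfl⟩ : ∃ q, j = 2 * q ∨ j = 2 * q + 1 := ⟨j / 2, by omega⟩ <;>
      push_cast at he <;> split_ifs at hj <;> omega

theorem pv_mem4 (cols x : Int) :
    (1 ≤ x ∧ x < cols + 1 ∧ ((x - 1) % 4 = 0 ∨ (x - 1) % 4 = 3))
      ↔ ∃ j : Nat, j < pvPN4 cols ∧ pvColFn4 (j : Int) = x := by
  constructor
  · rintro ⟨h1, hc, h3⟩
    refine ⟨(2 * ((x - 1) / 4) + ((x - 1) % 4) / 3).toNat, ?_, ?_⟩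
    · unfold pvPN4; split_ifs <;> omega
    · unfold pvColFn4
      simp only [PySem.Int.floordiv_eq_ediv_of_pos (show (0:Int) < 2 by norm_num),
                 PySem.Int.mod_eq_emod_of_pos (show (0:Int) < 2 by norm_num)]
      omega
  · rintro ⟨j, hj, he⟩
    unfold pvColFn4 at he
    simp only [PySem.Int.floordiv_eq_ediv_of_pos (show (0:Int) < 2 by norm_num),
               PySem.Int.mod_eq_emod_of_pos (show (0:Int) < 2 by norm_num)] at he
    unfold pvPN4 at hj
    obtain ⟨q, rfl | rfl⟩ : ∃ q, j = 2 * q ∨ j = 2 * q + 1 := ⟨j / 2, by omega⟩ <;>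
      push_cast at he <;> split_ifs at hj <;> omega

-- arrangement 3: the filtered column list of a row is pvColFn3 over one range
theorem pv_filter3_char (cols : Int) :
    (PySem.List.pyRange 1 (cols + 1) 1).filter
        (fun c => PySem.Int.mod (c - 1) 3 == 0 || PySem.Int.mod (c - 1) 3 == 2)
      = (List.range (pvPN3 cols)).map (fun j : Nat => pvColFn3 (j : Int)) := by
  apply pv_sorted_ext
  · exact (PySem.List.pairwise_lt_pyRange_one 1 (cols + 1)).filter _
  · rw [List.pairwise_map]
    exact List.Pairwise.imp
      (fun {a b : Nat} (h : a < b) =>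
        pvColFn3_lt (a : Int) (b : Int) (by exact_mod_cast h))
      List.pairwise_lt_range
  · intro x
    rw [List.mem_filter, PySem.List.mem_pyRange_one]
    simp only [List.mem_map, List.mem_range, Bool.or_eq_true, beq_iff_eq,
               PySem.Int.mod_eq_emod_of_pos (show (0:Int) < 3 by norm_num)]
    constructor
    · rintro ⟨⟨hx1, hx2⟩, hp⟩
      obtain ⟨j, hj, he⟩ := (pv_mem3 cols x).mp ⟨hx1, hx2, hp⟩
      exact ⟨j, hj, he⟩
    · rintro ⟨j, hj, he⟩
      have h := (pv_mem3 cols x).mpr ⟨j, hj, he⟩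
      exact ⟨⟨h.1, h.2.1⟩, h.2.2⟩

-- arrangement 4: same with groups of 4
theorem pv_filter4_char (cols : Int) :
    (PySem.List.pyRange 1 (cols + 1) 1).filter
        (fun c => PySem.Int.mod (c - 1) 4 == 0 || PySem.Int.mod (c - 1) 4 == 3)
      = (List.range (pvPN4 cols)).map (fun j : Nat => pvColFn4 (j : Int)) := by
  apply pv_sorted_ext
  · exact (PySem.List.pairwise_lt_pyRange_one 1 (cols + 1)).filter _
  · rw [List.pairwise_map]
    exact List.Pairwise.imp
      (fun {a b : Nat} (h : a < b) =>
        pvColFn4_lt (a : Int) (b : Int) (by exact_mod_cast h))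
      List.pairwise_lt_range
  · intro x
    rw [List.mem_filter, PySem.List.mem_pyRange_one]
    simp only [List.mem_map, List.mem_range, Bool.or_eq_true, beq_iff_eq,
               PySem.Int.mod_eq_emod_of_pos (show (0:Int) < 4 by norm_num)]
    constructor
    · rintro ⟨⟨hx1, hx2⟩, hp⟩
      obtain ⟨j, hj, he⟩ := (pv_mem4 cols x).mp ⟨hx1, hx2, hp⟩
      exact ⟨j, hj, he⟩
    · rintro ⟨j, hj, he⟩
      have h := (pv_mem4 cols x).mpr ⟨j, hj, he⟩
      exact ⟨⟨h.1, h.2.1⟩, h.2.2⟩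

-- positions of branch 2 as one range of seat indices
theorem pv_pos2 (rows cols : Int) :
    (PySem.List.pyRange 1 (rows + 1) 1).flatMap
        (fun row => (PySem.List.pyRange 2 (cols + 1) 2).map (fun c => (row, c)))
      = (List.range (rows.toNat * pvPN2 cols)).map
          (fun k : Nat => pvSeatB2 ((pvPN2 cols : Nat) : Int) (k : Int)) := by
  rw [pv_rowlist, List.flatMap_map]
  apply pv_flatMap_blocks
  intro i _
  rw [pv_row_step2 (1 + (i : Int)) 2 cols (pvPN2 cols) (pv_cnt2 cols)]
  apply List.map_congr_left
  intro j hj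
  rw [List.mem_range] at hj
  have hcast : ((i * pvPN2 cols + j : Nat) : Int)
      = (i : Int) * ((pvPN2 cols : Nat) : Int) + (j : Int) := by push_cast; ring
  unfold pvSeatB2
  rw [hcast]
  obtain ⟨hd, hm⟩ := pv_div_block ((pvPN2 cols : Nat) : Int) (i : Int) (j : Int)
    (Int.natCast_nonneg j) (by exact_mod_cast hj)
  rw [hd, hm]
  simp only [Prod.mk.injEq]
  exact ⟨by ring, by ring⟩

-- positions of branch 3
theorem pv_pos3 (rows cols : Int) :
    (PySem.List.pyRange 1 (rows + 1) 1).flatMap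
        (fun row => ((PySem.List.pyRange 1 (cols + 1) 1).filter
            (fun c => PySem.Int.mod (c - 1) 3 == 0 || PySem.Int.mod (c - 1) 3 == 2)).map
          (fun c => (row, c)))
      = (List.range (rows.toNat * pvPN3 cols)).map
          (fun k : Nat => pvSeatB3 ((pvPN3 cols : Nat) : Int) (k : Int)) := by
  simp only [pv_filter3_char]
  rw [pv_rowlist, List.flatMap_map]
  apply pv_flatMap_blocks
  intro i _
  rw [List.map_map]
  apply List.map_congr_left
  intro j hj
  rw [List.mem_range] at hj
  have hcast : ((i * pvPN3 cols + j : Nat) : Int)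
      = (i : Int) * ((pvPN3 cols : Nat) : Int) + (j : Int) := by push_cast; ring
  simp only [Function.comp]
  unfold pvSeatB3
  rw [hcast]
  obtain ⟨hd, hm⟩ := pv_div_block ((pvPN3 cols : Nat) : Int) (i : Int) (j : Int)
    (Int.natCast_nonneg j) (by exact_mod_cast hj)
  rw [hd, hm]
  simp only [Prod.mk.injEq]
  exact ⟨by ring, trivial⟩

-- positions of branch 4
theorem pv_pos4 (rows cols : Int) :
    (PySem.List.pyRange 1 (rows + 1) 1).flatMap
        (fun row => ((PySem.List.pyRange 1 (cols + 1) 1).filter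
            (fun c => PySem.Int.mod (c - 1) 4 == 0 || PySem.Int.mod (c - 1) 4 == 3)).map
          (fun c => (row, c)))
      = (List.range (rows.toNat * pvPN4 cols)).map
          (fun k : Nat => pvSeatB4 ((pvPN4 cols : Nat) : Int) (k : Int)) := by
  simp only [pv_filter4_char]
  rw [pv_rowlist, List.flatMap_map]
  apply pv_flatMap_blocks
  intro i _
  rw [List.map_map]
  apply List.map_congr_left
  intro j hj
  rw [List.mem_range] at hj
  have hcast : ((i * pvPN4 cols + j : Nat) : Int)
      = (i : Int) * ((pvPN4 cols : Nat) : Int) + (j : Int) := by push_cast; ring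
  simp only [Function.comp]
  unfold pvSeatB4
  rw [hcast]
  obtain ⟨hd, hm⟩ := pv_div_block ((pvPN4 cols : Nat) : Int) (i : Int) (j : Int)
    (Int.natCast_nonneg j) (by exact_mod_cast hj)
  rw [hd, hm]
  simp only [Prod.mk.injEq]
  exact ⟨by ring, trivial⟩

-- default branch: seat function and one row's seats, indexed by the 0-based row number
def pvGD (cols : Int) (k : Nat) : Int × Int :=
  pvSeatBD ((pvPOddN cols : Nat) : Int)
    (((pvPOddN cols : Nat) : Int) + ((pvPEvenN cols : Nat) : Int)) (k : Int)

def pvRowD (cols : Int) (i : Nat) : List (Int × Int) :=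
  (PySem.List.pyRange (if PySem.Int.mod (1 + (i : Int)) 2 = 1 then 1 else 2) (cols + 1) 2).map
    (fun c => (1 + (i : Int), c))

theorem pv_rowD_even (cols : Int) (a : Nat) :
    pvRowD cols (2 * a)
      = (List.range (pvPOddN cols)).map
          (fun j => pvGD cols (a * (pvPOddN cols + pvPEvenN cols) + j)) := by
  unfold pvRowD
  have hm1 : PySem.Int.mod (1 + ((2 * a : Nat) : Int)) 2 = 1 := by
    rw [PySem.Int.mod_eq_emod_of_pos (show (0:Int) < 2 by norm_num)]; push_cast; omega
  rw [if_pos hm1, pv_row_step2 _ 1 cols (pvPOddN cols) (pv_cnt1 cols)]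
  apply List.map_congr_left
  intro j hj
  rw [List.mem_range] at hj
  unfold pvGD pvSeatBD
  have hcast : ((a * (pvPOddN cols + pvPEvenN cols) + j : Nat) : Int)
      = (a : Int) * (((pvPOddN cols : Nat) : Int) + ((pvPEvenN cols : Nat) : Int)) + (j : Int) := by
    push_cast; ring
  have hjP : (j : Int) < ((pvPOddN cols : Nat) : Int) + ((pvPEvenN cols : Nat) : Int) := by
    have : j < pvPOddN cols + pvPEvenN cols := lt_of_lt_of_le hj (Nat.le_add_right _ _)
    omega
  obtain ⟨hd, hm⟩ := pv_div_block _ (a : Int) (j : Int) (Int.natCast_nonneg j) hjP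
  rw [hcast, hd, hm]
  rw [if_pos (show (j : Int) < ((pvPOddN cols : Nat) : Int) by exact_mod_cast hj)]
  simp only [Prod.mk.injEq]
  constructor
  · push_cast; ring
  · ring

theorem pv_rowD_odd (cols : Int) (a : Nat) :
    pvRowD cols (2 * a + 1)
      = (List.range (pvPEvenN cols)).map
          (fun t => pvGD cols (a * (pvPOddN cols + pvPEvenN cols) + (pvPOddN cols + t))) := by
  unfold pvRowD
  have hm1 : ¬ PySem.Int.mod (1 + ((2 * a + 1 : Nat) : Int)) 2 = 1 := by
    rw [PySem.Int.mod_eq_emod_of_pos (show (0:Int) < 2 by norm_num)]; push_cast; omega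
  rw [if_neg hm1, pv_row_step2 _ 2 cols (pvPEvenN cols) (pv_cnt2 cols)]
  apply List.map_congr_left
  intro t ht
  rw [List.mem_range] at ht
  unfold pvGD pvSeatBD
  have hcast : ((a * (pvPOddN cols + pvPEvenN cols) + (pvPOddN cols + t) : Nat) : Int)
      = (a : Int) * (((pvPOddN cols : Nat) : Int) + ((pvPEvenN cols : Nat) : Int))
          + (((pvPOddN cols : Nat) : Int) + (t : Int)) := by
    push_cast; ring
  have hjP : ((pvPOddN cols : Nat) : Int) + (t : Int)
      < ((pvPOddN cols : Nat) : Int) + ((pvPEvenN cols : Nat) : Int) := by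
    have : t < pvPEvenN cols := ht
    omega
  have hj0 : (0 : Int) ≤ ((pvPOddN cols : Nat) : Int) + (t : Int) := by positivity
  obtain ⟨hd, hm⟩ := pv_div_block _ (a : Int) _ hj0 hjP
  rw [hcast, hd, hm]
  rw [if_neg (show ¬ ((pvPOddN cols : Nat) : Int) + (t : Int) < ((pvPOddN cols : Nat) : Int) by omega)]
  simp only [Prod.mk.injEq]
  constructor
  · push_cast; ring
  · ring

theorem pv_posD_pairs (cols : Int) (a : Nat) :
    (List.range (2 * a)).flatMap (pvRowD cols)
      = (List.range (a * (pvPOddN cols + pvPEvenN cols))).map (pvGD cols) := by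
  induction a with
  | zero => simp
  | succ b ih =>
    have h2 : 2 * (b + 1) = 2 * b + 2 := by ring
    rw [h2, List.range_add, List.flatMap_append, ih]
    have hr2 : List.range 2 = [0, 1] := rfl
    rw [hr2]
    simp only [List.map_cons, List.map_nil, List.flatMap_cons, List.flatMap_nil, List.append_nil]
    have e0 : 2 * b + 0 = 2 * b := by omega
    rw [e0, pv_rowD_even, pv_rowD_odd]
    have h3 : (b + 1) * (pvPOddN cols + pvPEvenN cols)
        = (b * (pvPOddN cols + pvPEvenN cols) + pvPOddN cols) + pvPEvenN cols := by ring
    rw [h3, List.range_add, List.range_add, List.map_append, List.map_append,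
        List.map_map, List.map_map]
    rw [List.append_assoc]
    congr 1
    congr 1
    apply List.map_congr_left
    intro t _
    simp only [Function.comp]
    congr 1
    omega

theorem pv_posD_nat (cols : Int) (RN : Nat) :
    (List.range RN).flatMap (pvRowD cols)
      = (List.range ((RN + 1) / 2 * pvPOddN cols + RN / 2 * pvPEvenN cols)).map (pvGD cols) := by
  obtain ⟨a, rfl | rfl⟩ : ∃ a, RN = 2 * a ∨ RN = 2 * a + 1 := ⟨RN / 2, by omega⟩
  · have he : (2 * a + 1) / 2 * pvPOddN cols + 2 * a / 2 * pvPEvenN cols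
        = a * (pvPOddN cols + pvPEvenN cols) := by
      have h1 : (2 * a + 1) / 2 = a := by omega
      have h2 : 2 * a / 2 = a := by omega
      rw [h1, h2]; ring
    rw [he, pv_posD_pairs]
  · rw [List.range_succ, List.flatMap_append, pv_posD_pairs]
    simp only [List.flatMap_cons, List.flatMap_nil, List.append_nil]
    rw [pv_rowD_even]
    have he : (2 * a + 1 + 1) / 2 * pvPOddN cols + (2 * a + 1) / 2 * pvPEvenN cols
        = a * (pvPOddN cols + pvPEvenN cols) + pvPOddN cols := by
      have h1 : (2 * a + 1 + 1) / 2 = a + 1 := by omega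
      have h2 : (2 * a + 1) / 2 = a := by omega
      rw [h1, h2]; ring
    rw [he, List.range_add, List.map_append, List.map_map]
    rfl

-- positions of the default branch
theorem pv_posD (rows cols : Int) :
    (PySem.List.pyRange 1 (rows + 1) 1).flatMap
        (fun row => (PySem.List.pyRange (if PySem.Int.mod row 2 = 1 then 1 else 2) (cols + 1) 2).map
          (fun c => (row, c)))
      = (List.range ((rows.toNat + 1) / 2 * pvPOddN cols + rows.toNat / 2 * pvPEvenN cols)).map
          (fun k : Nat => pvSeatBD ((pvPOddN cols : Nat) : Int)
            (((pvPOddN cols : Nat) : Int) + ((pvPEvenN cols : Nat) : Int)) (k : Int)) := by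
  rw [pv_rowlist, List.flatMap_map]
  exact pv_posD_nat cols rows.toNat

-- casts between Source B's Int-side counts/capacities and the Nat versions above
theorem pv_p2_cast (cols : Int) :
    (if 0 < cols then PySem.Int.floordiv cols 2 else 0) = ((pvPN2 cols : Nat) : Int) := by
  unfold pvPN2
  split_ifs with h
  · rw [PySem.Int.floordiv_eq_ediv_of_pos (show (0:Int) < 2 by norm_num)]; omega
  · omega

theorem pv_p3_cast (cols : Int) :
    (if 0 < cols then
        2 * PySem.Int.floordiv cols 3 + (if 1 ≤ PySem.Int.mod cols 3 then 1 else 0) else 0)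
      = ((pvPN3 cols : Nat) : Int) := by
  unfold pvPN3
  by_cases h : 0 < cols
  · rw [if_pos h, PySem.Int.floordiv_eq_ediv_of_pos (show (0:Int) < 3 by norm_num),
        PySem.Int.mod_eq_emod_of_pos (show (0:Int) < 3 by norm_num)]
    by_cases h2 : (1 : Int) ≤ cols % 3
    · rw [if_pos h2, if_pos (show 1 ≤ cols.toNat % 3 by omega)]; push_cast; omega
    · rw [if_neg h2, if_neg (show ¬ 1 ≤ cols.toNat % 3 by omega)]; push_cast; omega
  · rw [if_neg h]
    have h0 : cols.toNat = 0 := by omega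
    simp [h0]

theorem pv_p4_cast (cols : Int) :
    (if 0 < cols then
        2 * PySem.Int.floordiv cols 4 + (if 1 ≤ PySem.Int.mod cols 4 then 1 else 0) else 0)
      = ((pvPN4 cols : Nat) : Int) := by
  unfold pvPN4
  by_cases h : 0 < cols
  · rw [if_pos h, PySem.Int.floordiv_eq_ediv_of_pos (show (0:Int) < 4 by norm_num),
        PySem.Int.mod_eq_emod_of_pos (show (0:Int) < 4 by norm_num)]
    by_cases h2 : (1 : Int) ≤ cols % 4
    · rw [if_pos h2, if_pos (show 1 ≤ cols.toNat % 4 by omega)]; push_cast; omega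
    · rw [if_neg h2, if_neg (show ¬ 1 ≤ cols.toNat % 4 by omega)]; push_cast; omega
  · rw [if_neg h]
    have h0 : cols.toNat = 0 := by omega
    simp [h0]

theorem pv_pOdd_cast (cols : Int) :
    (if 0 < cols then PySem.Int.floordiv (cols + 1) 2 else 0) = ((pvPOddN cols : Nat) : Int) := by
  unfold pvPOddN
  split_ifs with h
  · rw [PySem.Int.floordiv_eq_ediv_of_pos (show (0:Int) < 2 by norm_num)]; omega
  · omega

theorem pv_cap_cast (rows : Int) (pN : Nat) :
    (if 0 < rows then rows else 0) * ((pN : Nat) : Int) = ((rows.toNat * pN : Nat) : Int) := by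
  split_ifs with h
  · have hr : ((rows.toNat : Nat) : Int) = rows := Int.toNat_of_nonneg (le_of_lt h)
    push_cast
    rw [hr]
  · have h0 : rows.toNat = 0 := by omega
    simp [h0]

theorem pv_capD_cast (rows : Int) (pO pE : Nat) :
    PySem.Int.floordiv ((if 0 < rows then rows else 0) + 1) 2 * ((pO : Nat) : Int)
        + PySem.Int.floordiv (if 0 < rows then rows else 0) 2 * ((pE : Nat) : Int)
      = (((rows.toNat + 1) / 2 * pO + rows.toNat / 2 * pE : Nat) : Int) := by
  rw [PySem.Int.floordiv_eq_ediv_of_pos (show (0:Int) < 2 by norm_num),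
      PySem.Int.floordiv_eq_ediv_of_pos (show (0:Int) < 2 by norm_num)]
  have h1 : ((if 0 < rows then rows else 0) + 1) / 2 = (((rows.toNat + 1) / 2 : Nat) : Int) := by
    split_ifs with h <;> omega
  have h2 : (if 0 < rows then rows else 0) / 2 = ((rows.toNat / 2 : Nat) : Int) := by
    split_ifs with h <;> omega
  rw [h1, h2]
  push_cast
  ring

-- ===== VERDICT (by name: the statement is the Claim_ definition above) =====
theorem assign_by_seating_arrangement_py_spec : Claim_equal_assign_by_seating_arrangement_py := by
  intro eid students rows cols arr _hdom _hpre
  unfold Spec_assign_by_seating_arrangement_py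
  unfold assign_by_seating_arrangement_py assign_by_seating_arrangement_py_alt
  by_cases h2 : arr = 2
  · simp only [h2, if_true]
    rw [pvAOuter_eq eid students cols _ _ (pvInnerPlain_spec eid students cols _),
        pvRun_eq_zip]
    simp only [List.drop_zero, List.nil_append]
    rw [pv_pos2 rows cols, pvBuild_eq, pv_p2_cast, pv_cap_cast]
  · by_cases h3 : arr = 3
    · simp only [h3, reduceIte]
      rw [pvAOuter_eq eid students cols _ _ (pvInner3_spec eid students cols _),
          pvRun_eq_zip]
      simp only [List.drop_zero, List.nil_append]
      rw [pv_pos3 rows cols, pvBuild_eq, pv_p3_cast, pv_cap_cast]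
      norm_num
    · by_cases h4 : arr = 4
      · simp only [h4, reduceIte]
        rw [pvAOuter_eq eid students cols _ _ (pvInner4_spec eid students cols _),
            pvRun_eq_zip]
        simp only [List.drop_zero, List.nil_append]
        rw [pv_pos4 rows cols, pvBuild_eq, pv_p4_cast, pv_cap_cast]
        norm_num
      · simp only [h2, h3, h4, if_false]
        rw [pvAOuter_eq eid students cols _ _ (pvInnerPlain_spec eid students cols _),
            pvRun_eq_zip]
        simp only [List.drop_zero, List.nil_append]
        rw [pv_posD rows cols, pvBuild_eq, pv_pOdd_cast, pv_p2_cast, pv_capD_cast]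
        rfl
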